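-- pv_equiv track=rewrite | github.com/vilu9169/Group-3-SEMP | AI/MoveGenerator.py | find_all_player_stacks
-- ===== SOURCE A (Python) =====
-- board_size = 4
--
-- def find_all_player_stacks(board, player):
--     stacks = [] # [row, col, start, stacked_flats]
--     # Iterate through board
--     for row in range(board_size):
--         for col in range(board_size):
--             # Only proceed if player has flat in stack
--             if player+1 in board[row][col]:
--                 stack = board[row][col]
--                 # Disregard last if piece is standing
--                 #if board[row][col][0] == 1:
--                     #stack = board[row][col][:-1]
--                 #else:
--                     #stack = board[row][col]
--                 # Find all personal stacks in big stack
--                 for index, flat in enumerate(stack):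
--                     # Keep track of stacked flats
--                     stacked_flats = 0
--                     # Find flat belonging to player
--                     if flat == player+1:
--                         # Save start index
--                         start = index
--                         stacked_flats += 1
--                         # Find all stacked flats
--                         while(index+1 < len(stack) and stack[index+1] == player+1):
--                             stacked_flats += 1
--                             index += 1
--                         stacks.append([row, col, start, stacked_flats])
--     return stacks
-- ===== SOURCE B (Python) =====
-- board_size = 4
--
-- def find_all_player_stacks(board, player):
--     p = player + 1
--     out = []
--     for row in range(board_size):
--         for col in range(board_size):
--             stack = board[row][col]
--             n = len(stack)
--             run = 0  # length of the run of p's ending just before position i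
--             for i in range(n + 1):
--                 if i < n and stack[i] == p:
--                     run += 1
--                 elif run:
--                     start = i - run
--                     out.extend([row, col, start + j, run - j] for j in range(run))
--                     run = 0
--     return out
-- ===== Notes on version B (the rewrite author's own statement) =====
-- stated objective: alternative
-- what changed: Replaces A's membership pre-check plus per-match forward while-rescan by a single forward pass that accumulates each maximal run of the player's flats and, when a run ends, emits all its overlapping sub-runs in one batch.
import Mathlib
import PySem

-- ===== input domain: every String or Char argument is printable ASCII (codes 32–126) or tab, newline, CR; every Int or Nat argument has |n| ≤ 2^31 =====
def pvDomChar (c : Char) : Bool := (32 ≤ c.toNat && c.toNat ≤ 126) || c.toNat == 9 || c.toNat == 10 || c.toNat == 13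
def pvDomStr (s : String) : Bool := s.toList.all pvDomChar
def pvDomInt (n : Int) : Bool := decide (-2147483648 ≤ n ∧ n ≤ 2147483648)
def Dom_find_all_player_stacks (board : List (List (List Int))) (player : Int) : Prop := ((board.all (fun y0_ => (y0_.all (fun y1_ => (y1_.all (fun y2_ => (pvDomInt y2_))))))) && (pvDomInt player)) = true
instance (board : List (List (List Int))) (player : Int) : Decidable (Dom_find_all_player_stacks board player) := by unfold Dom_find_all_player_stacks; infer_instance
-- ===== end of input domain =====

-- B replaces A's per-match forward while-rescan (and the membership pre-check) by one forward
-- pass per stack that accumulates maximal runs and emits each run's sub-runs in one batch.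

-- ===== PORT A =====
-- the while loop: while(index+1 < len(stack) and stack[index+1] == player+1)
def pvAWhile (stack : List Int) (p : Int) (index : Nat) (sf : Int) : Nat × Int :=
  if h : index + 1 < stack.length then
    if stack[index + 1] = p then pvAWhile stack p (index + 1) (sf + 1)
    else (index, sf)
  else (index, sf)
termination_by stack.length - index

-- for index, flat in enumerate(stack): …
def pvAEnum (stack : List Int) (r c p : Int) : List Int → Nat → List (List Int) → List (List Int)
  | [], _, acc => acc
  | f :: t, idx, acc =>
    pvAEnum stack r c p t (idx + 1)
      (if f = p then acc ++ [[r, c, (idx : Int), (pvAWhile stack p idx 1).2]] else acc)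

def pvACell (board : List (List (List Int))) (player : Int) (row col : Nat)
    (acc : List (List Int)) : List (List Int) :=
  let cell := (board.getD row []).getD col []
  if cell.contains (player + 1) then
    pvAEnum cell (row : Int) (col : Int) (player + 1) cell 0 acc
  else acc

def find_all_player_stacks (board : List (List (List Int))) (player : Int) : List (List Int) :=
  (List.range 4).foldl (fun acc row =>
    (List.range 4).foldl (fun acc2 col => pvACell board player row col acc2) acc) []

-- ===== PORT B =====
-- out.extend([row, col, start + j, run - j] for j in range(run))
def pvEmit (r c : Int) (start run : Nat) : List (List Int) :=
  (List.range run).map (fun (j : Nat) => [r, c, (start : Int) + (j : Int), (run : Int) - (j : Int)])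

-- the forward scan: `run` counts the run of p's ending just before index i; at a
-- non-match or at the end of the stack a nonempty run is flushed via pvEmit
def pvBScan (r c p : Int) : List Int → Nat → Nat → List (List Int) → List (List Int)
  | [], i, run, acc => if run ≠ 0 then acc ++ pvEmit r c (i - run) run else acc
  | x :: t, i, run, acc =>
    if x = p then pvBScan r c p t (i + 1) (run + 1) acc
    else pvBScan r c p t (i + 1) 0 (if run ≠ 0 then acc ++ pvEmit r c (i - run) run else acc)

def pvBCell (board : List (List (List Int))) (player : Int) (row col : Nat)
    (acc : List (List Int)) : List (List Int) :=
  pvBScan (row : Int) (col : Int) (player + 1) ((board.getD row []).getD col []) 0 0 acc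

def find_all_player_stacks_alt (board : List (List (List Int))) (player : Int) : List (List Int) :=
  (List.range 4).foldl (fun acc row =>
    (List.range 4).foldl (fun acc2 col => pvBCell board player row col acc2) acc) []

-- ===== PRECONDITION & SPEC =====
-- Pre_ excludes exactly the boards on which Python A raises IndexError: fewer than 4 rows,
-- or one of the first 4 rows with fewer than 4 cells.
def Pre_find_all_player_stacks (board : List (List (List Int))) (player : Int) : Prop :=
  4 ≤ board.length ∧ ∀ r ∈ List.range 4, 4 ≤ (board.getD r []).length
instance (board : List (List (List Int))) (player : Int) : Decidable (Pre_find_all_player_stacks board player) := by unfold Pre_find_all_player_stacks; infer_instance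

def pvWitness_find_all_player_stacks : List (List (List Int)) × Int :=
  ([[[1, 2], [], [], []], [[], [2, 2, 1], [], []], [[], [], [], []], [[], [], [], [1]]], 1)

def Spec_find_all_player_stacks (board : List (List (List Int))) (player : Int) (out : List (List Int)) : Prop := out = find_all_player_stacks_alt board player
instance (board : List (List (List Int))) (player : Int) (out : List (List Int)) : Decidable (Spec_find_all_player_stacks board player out) := by unfold Spec_find_all_player_stacks; infer_instance

-- ===== CLAIM (what is proved, stated in full; the proofs are below) =====
def Claim_equal_find_all_player_stacks : Prop := ∀ (board : List (List (List Int))) (player : Int), Dom_find_all_player_stacks board player → Pre_find_all_player_stacks board player → Spec_find_all_player_stacks board player (find_all_player_stacks board player)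

-- ===== LEMMAS AND PROOFS =====

-- leading run of p's: what A's while loop adds, and what extends B's pending run
def pvLead (p : Int) : List Int → Int
  | [] => 0
  | x :: xs => if x = p then pvLead p xs + 1 else 0

-- reference per-cell result on the remaining list: one entry per matching index
def pvRef (r c p : Int) : List Int → Nat → List (List Int)
  | [], _ => []
  | x :: t, idx =>
    (if x = p then [[r, c, (idx : Int), pvLead p t + 1]] else []) ++ pvRef r c p t (idx + 1)

theorem pvAWhile_eq (stack : List Int) (p : Int) :
    ∀ (t : List Int) (idx : Nat) (sf : Int), stack.drop (idx + 1) = t →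
      (pvAWhile stack p idx sf).2 = sf + pvLead p t := by
  intro t
  induction t with
  | nil =>
    intro idx sf h
    have hlen : ¬ idx + 1 < stack.length := by
      intro hlt
      have := List.drop_eq_nil_iff.mp h
      omega
    rw [pvAWhile, dif_neg hlen]; simp [pvLead]
  | cons x xs ih =>
    intro idx sf h
    have hlen : idx + 1 < stack.length := by
      by_contra hn
      have hnil : stack.drop (idx + 1) = [] := List.drop_eq_nil_iff.mpr (by omega)
      rw [hnil] at h; simp at h
    have hget? : stack[idx + 1]? = some x := by
      have h1 := congrArg (fun (l : List Int) => l[0]?) h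
      simpa [List.getElem?_drop] using h1
    have hget : stack[idx + 1] = x := by
      rw [List.getElem?_eq_getElem hlen] at hget?
      exact Option.some.inj hget?
    have htail : stack.drop (idx + 1 + 1) = xs := by
      have h2 := congrArg (fun (l : List Int) => l.drop 1) h
      simpa [List.drop_drop, Nat.add_comm] using h2
    rw [pvAWhile, dif_pos hlen, hget]
    by_cases hx : x = p
    · rw [if_pos hx, ih (idx + 1) (sf + 1) htail]
      simp only [pvLead, if_pos hx]; ring
    · rw [if_neg hx]; simp [pvLead, hx]

-- A's enumerate loop computes the reference result
theorem pvAEnum_eq_ref (stack : List Int) (r c p : Int) :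
    ∀ (rest : List Int) (idx : Nat) (acc : List (List Int)), stack.drop idx = rest →
      pvAEnum stack r c p rest idx acc = acc ++ pvRef r c p rest idx := by
  intro rest
  induction rest with
  | nil => intro idx acc _; simp [pvAEnum, pvRef]
  | cons f t ih =>
    intro idx acc h
    have htail : stack.drop (idx + 1) = t := by
      have h2 := congrArg (fun (l : List Int) => l.drop 1) h
      simpa [List.drop_drop, Nat.add_comm] using h2
    rw [pvAEnum, pvRef]
    by_cases hf : f = p
    · rw [if_pos hf, if_pos hf, ih (idx + 1) _ htail,
        pvAWhile_eq stack p t idx 1 htail]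
      simp only [List.append_assoc, List.singleton_append]
      congr 3
      ring
    · rw [if_neg hf, if_neg hf, ih (idx + 1) _ htail]
      simp

-- the pending run of length `run` ending before `i`, merged with the lead of `rest`
def pvPend (r c p : Int) (rest : List Int) (i run : Nat) : List (List Int) :=
  (List.range run).map
    (fun (j : Nat) => [r, c, ((i - run : Nat) : Int) + (j : Int), (run : Int) + pvLead p rest - (j : Int)])

theorem pvPend_nil (r c p : Int) (i run : Nat) :
    pvPend r c p [] i run = pvEmit r c (i - run) run := by
  simp [pvPend, pvEmit, pvLead]

theorem pvPend_zero (r c p : Int) (rest : List Int) (i : Nat) :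
    pvPend r c p rest i 0 = [] := by
  simp [pvPend]

-- extending the pending run by one match = keep the old pending entries and add the new one
theorem pvPend_step (r c p x : Int) (t : List Int) (i run : Nat) (hx : x = p) (hle : run ≤ i) :
    pvPend r c p t (i + 1) (run + 1)
      = pvPend r c p (x :: t) i run ++ [[r, c, (i : Int), pvLead p t + 1]] := by
  have h1 : i + 1 - (run + 1) = i - run := by omega
  simp only [pvPend, h1, List.range_succ, List.map_append, List.map_cons, List.map_nil]
  congr 1
  · apply List.map_congr_left
    intro j _
    have h4 : ((run + 1 : Nat) : Int) + pvLead p t - (j : Int)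
        = ((run : Nat) : Int) + pvLead p (x :: t) - (j : Int) := by
      simp only [pvLead, if_pos hx]; push_cast; ring
    rw [h4]
  · have h2 : (((i - run : Nat)) : Int) + ((run : Nat) : Int) = ((i : Nat) : Int) := by omega
    have h3 : ((run + 1 : Nat) : Int) + pvLead p t - ((run : Nat) : Int) = pvLead p t + 1 := by
      push_cast; ring
    rw [h2, h3]

-- B's scan computes: pending-run expansion, then the reference result of the rest
theorem pvBScan_eq_ref (r c p : Int) :
    ∀ (rest : List Int) (i run : Nat) (acc : List (List Int)), run ≤ i →
      pvBScan r c p rest i run acc = acc ++ pvPend r c p rest i run ++ pvRef r c p rest i := by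
  intro rest
  induction rest with
  | nil =>
    intro i run acc _
    by_cases hr : run = 0
    · subst hr; simp [pvBScan, pvRef, pvPend_zero]
    · rw [pvBScan, if_pos hr, pvPend_nil]; simp [pvRef]
  | cons x t ih =>
    intro i run acc hle
    rw [pvBScan, pvRef]
    by_cases hx : x = p
    · rw [if_pos hx, if_pos hx, ih (i + 1) (run + 1) acc (by omega),
        pvPend_step r c p x t i run hx hle]
      simp
    · rw [if_neg hx, if_neg hx, ih (i + 1) 0 _ (by omega), pvPend_zero]
      by_cases hr : run = 0
      · subst hr; simp [pvPend_zero]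
      · rw [if_pos hr]
        have : pvPend r c p (x :: t) i run = pvEmit r c (i - run) run := by
          simp [pvPend, pvEmit, pvLead, hx]
        rw [this]; simp

theorem pvRef_nomatch (r c p : Int) :
    ∀ (rest : List Int) (idx : Nat), (∀ x ∈ rest, ¬ x = p) → pvRef r c p rest idx = [] := by
  intro rest
  induction rest with
  | nil => intro idx _; simp [pvRef]
  | cons f t ih =>
    intro idx hno
    rw [pvRef, if_neg (hno f (by simp)), ih (idx + 1) (fun x hx => hno x (by simp [hx]))]
    simp

theorem pvCell_eq (board : List (List (List Int))) (player : Int) (row col : Nat)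
    (acc : List (List Int)) : pvACell board player row col acc = pvBCell board player row col acc := by
  unfold pvACell pvBCell
  set cell := (board.getD row []).getD col [] with hcell
  rw [pvBScan_eq_ref _ _ _ cell 0 0 acc (le_refl 0), pvPend_zero]
  by_cases hc : cell.contains (player + 1)
  · rw [if_pos hc, pvAEnum_eq_ref cell _ _ _ cell 0 acc (by simp)]
    simp
  · rw [if_neg hc, pvRef_nomatch]
    · simp
    · have hmem : (player + 1) ∉ cell := by simpa using hc
      intro x hx hxp
      exact hmem (hxp ▸ hx)

-- ===== VERDICT (by name: the statement is the Claim_ definition above) =====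
theorem find_all_player_stacks_spec : Claim_equal_find_all_player_stacks := by
  intro board player _hdom _hpre
  unfold Spec_find_all_player_stacks find_all_player_stacks find_all_player_stacks_alt
  congr 1
  funext acc row
  congr 1
  funext acc2 col
  exact pvCell_eq board player row col acc2
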